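-- pv_equiv track=rewrite | github.com/adiens916/NOTE-algorithm | problems/Baekjoon_Online_Judge/Step_by_step/10_Brute_force/18111_마인크래프트.py | dig_then_put_for_height_with_blocks
-- ===== SOURCE A (Python) =====
-- def dig_then_put_for_height_with_blocks(lands, flat, B) -> int:
--     # NOTE: MAX 값을 잘못 설정하니까 틀렸었음.
--     MAX_WORK_TIME = 500 * 500 * 256 * 2
--     work_time = 0
--
--     for line in lands:
--         for block in line:
--             if block >= flat:
--                 diff = block - flat
--                 # dig
--                 B += diff
--                 work_time += diff * 2
--
--             elif block < flat:
--                 diff = flat - block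
--                 # put
--                 B -= diff
--                 work_time += diff
--
--     if B < 0:
--         return MAX_WORK_TIME
--     else:
--         return work_time
-- ===== SOURCE B (Python) =====
-- def dig_then_put_for_height_with_blocks(lands, flat, B) -> int:
--     MAX_WORK_TIME = 500 * 500 * 256 * 2
--     # histogram of block heights, then one pass over distinct heights
--     hist = {}
--     for row in lands:
--         for block in row:
--             hist[block] = hist.get(block, 0) + 1
--     work_time = 0
--     for height, count in hist.items():
--         if height >= flat:
--             B += (height - flat) * count
--             work_time += 2 * (height - flat) * count
--         else:
--             B -= (flat - height) * count
--             work_time += (flat - height) * count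
--     return MAX_WORK_TIME if B < 0 else work_time
-- ===== Notes on version B (the rewrite author's own statement) =====
-- stated objective: alternative
-- what changed: B builds a height histogram (dict) in one pass, then computes the block budget adjustment and work time in a single loop over the distinct (height, count) pairs instead of accumulating per individual block.
import Mathlib
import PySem

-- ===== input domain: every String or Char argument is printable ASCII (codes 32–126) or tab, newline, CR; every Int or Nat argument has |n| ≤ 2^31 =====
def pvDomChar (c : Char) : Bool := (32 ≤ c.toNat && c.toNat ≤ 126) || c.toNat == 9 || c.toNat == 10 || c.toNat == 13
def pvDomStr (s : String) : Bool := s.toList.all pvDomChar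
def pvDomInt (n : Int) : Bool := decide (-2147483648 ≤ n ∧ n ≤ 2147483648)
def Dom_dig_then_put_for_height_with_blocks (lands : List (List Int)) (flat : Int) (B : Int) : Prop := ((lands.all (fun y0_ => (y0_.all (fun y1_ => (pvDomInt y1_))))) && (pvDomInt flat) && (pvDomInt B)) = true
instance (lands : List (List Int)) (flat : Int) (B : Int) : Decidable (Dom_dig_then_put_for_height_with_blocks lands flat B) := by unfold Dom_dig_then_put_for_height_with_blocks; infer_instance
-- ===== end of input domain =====

-- B replaces A's per-block accumulation by a height histogram (dict) and one pass
-- over the distinct (height, count) pairs; objective: alternative decomposition.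

-- ===== PORT A =====
def dig_then_put_for_height_with_blocks (lands : List (List Int)) (flat : Int) (B : Int) : Int :=
  let MAX_WORK_TIME : Int := 500 * 500 * 256 * 2
  let st : Int × Int :=
    lands.foldl (fun st line =>
      line.foldl (fun st block =>
        if block ≥ flat then
          let diff := block - flat
          (st.1 + diff, st.2 + diff * 2)
        else
          let diff := flat - block
          (st.1 - diff, st.2 + diff)) st) (B, 0)
  if st.1 < 0 then MAX_WORK_TIME else st.2

-- ===== PORT B =====
def dig_then_put_for_height_with_blocks_alt (lands : List (List Int)) (flat : Int) (B : Int) : Int :=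
  let MAX_WORK_TIME : Int := 500 * 500 * 256 * 2
  let hist : PySem.Dict Int Int :=
    lands.foldl (fun d row =>
      row.foldl (fun d block => d.insert block (d.getD block 0 + 1)) d) PySem.Dict.empty
  let st : Int × Int :=
    hist.items.foldl (fun st p =>
      if p.1 ≥ flat then
        (st.1 + (p.1 - flat) * p.2, st.2 + 2 * (p.1 - flat) * p.2)
      else
        (st.1 - (flat - p.1) * p.2, st.2 + (flat - p.1) * p.2)) (B, 0)
  if st.1 < 0 then MAX_WORK_TIME else st.2

-- ===== PRECONDITION & SPEC =====
def Spec_dig_then_put_for_height_with_blocks (lands : List (List Int)) (flat : Int) (B : Int) (out : Int) : Prop := out = dig_then_put_for_height_with_blocks_alt lands flat B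
instance (lands : List (List Int)) (flat : Int) (B : Int) (out : Int) : Decidable (Spec_dig_then_put_for_height_with_blocks lands flat B out) := by unfold Spec_dig_then_put_for_height_with_blocks; infer_instance

-- ===== CLAIM (what is proved, stated in full; the proofs are below) =====
def Claim_equal_dig_then_put_for_height_with_blocks : Prop := ∀ (lands : List (List Int)) (flat : Int) (B : Int), Dom_dig_then_put_for_height_with_blocks lands flat B → Spec_dig_then_put_for_height_with_blocks lands flat B (dig_then_put_for_height_with_blocks lands flat B)

-- ===== LEMMAS AND PROOFS =====

-- a nested foldl over a list of lists is the foldl over the flattened list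
theorem pv_foldl_nested {α σ : Type} (f : σ → α → σ) (ls : List (List α)) (s : σ) :
    ls.foldl (fun s l => l.foldl f s) s = (ls.flatMap id).foldl f s := by
  induction ls generalizing s with
  | nil => rfl
  | cons l ls ih => simp [List.flatMap_cons, List.foldl_append, ih]

-- a fold whose step adds (f x, g x) to the two components
theorem pv_foldl_pair {α : Type} (f g : α → Int) (l : List α) (s : Int × Int) :
    l.foldl (fun s x => (s.1 + f x, s.2 + g x)) s = (s.1 + (l.map f).sum, s.2 + (l.map g).sum) := by
  induction l generalizing s with
  | nil => simp
  | cons x l ih => simp [ih]; constructor <;> ring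

theorem pv_map_sum_shift (S : List Int) (hS : S.Nodup) (a : Int) (ha : a ∈ S)
    (c g : Int → Int) :
    (S.map (fun k => (c k + if k = a then 1 else 0) * g k)).sum
      = (S.map (fun k => c k * g k)).sum + g a := by
  induction S with
  | nil => simp at ha
  | cons s S ih =>
    rcases List.mem_cons.mp ha with h | h
    · subst h
      have hna : a ∉ S := (List.nodup_cons.mp hS).1
      have hmap : S.map (fun k => (c k + if k = a then 1 else 0) * g k)
           = S.map (fun k => c k * g k) := by
        apply List.map_congr_left
        intro k hk
        have : k ≠ a := fun e => hna (e ▸ hk)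
        simp [this]
      simp only [List.map_cons, List.sum_cons, hmap]
      simp
      ring
    · have hih := ih (List.nodup_cons.mp hS).2 h
      have hsa : s ≠ a := fun e => (List.nodup_cons.mp hS).1 (by rw [e]; exact h)
      simp only [List.map_cons, List.sum_cons, hih, if_neg hsa]
      ring

-- grouped sum over the distinct elements with multiplicities = plain sum
theorem pv_sum_count (g : Int → Int) (xs : List Int) :
    ((PySem.Set.ofList xs).map (fun k => g k * (xs.count k : Int))).sum = (xs.map g).sum := by
  induction xs using List.reverseRecOn with
  | nil => simp [PySem.Set.ofList_nil]
  | append_singleton xs a ih =>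
    rw [PySem.Set.ofList_append_singleton]
    by_cases hmem : a ∈ xs
    · have haS : a ∈ PySem.Set.ofList xs := (PySem.Set.mem_ofList xs a).mpr hmem
      rw [PySem.Set.add_of_mem haS]
      have : (PySem.Set.ofList xs).map (fun k => g k * ((xs ++ [a]).count k : Int))
           = (PySem.Set.ofList xs).map (fun k => (((xs.count k : Int)) + if k = a then 1 else 0) * g k) := by
        apply List.map_congr_left
        intro k _
        by_cases hk : k = a
        · have h1 : List.count k [a] = 1 := by simp [hk]
          simp [List.count_append, hk]
          ring
        · have h0 : List.count k [a] = 0 := by simp [List.count_eq_zero, hk]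
          simp [List.count_append, h0, hk]
          ring
      rw [this, pv_map_sum_shift (PySem.Set.ofList xs) (PySem.Set.nodup_ofList xs) a haS]
      have : (PySem.Set.ofList xs).map (fun k => (xs.count k : Int) * g k)
           = (PySem.Set.ofList xs).map (fun k => g k * (xs.count k : Int)) := by
        apply List.map_congr_left; intro k _; ring
      rw [this, ih]; simp
    · have haS : a ∉ PySem.Set.ofList xs := fun h => hmem ((PySem.Set.mem_ofList xs a).mp h)
      rw [PySem.Set.add_of_not_mem haS]
      have h1 : (PySem.Set.ofList xs).map (fun k => g k * ((xs ++ [a]).count k : Int))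
           = (PySem.Set.ofList xs).map (fun k => g k * (xs.count k : Int)) := by
        apply List.map_congr_left
        intro k hk
        have hka : k ≠ a := fun e => haS (e ▸ hk)
        have h0 : List.count k [a] = 0 := by simp [List.count_eq_zero, hka]
        simp [List.count_append, h0]
      have hca : ((xs ++ [a]).count a : Int) = 1 := by
        simp [List.count_append, List.count_eq_zero_of_not_mem hmem]
      simp only [List.map_append, List.map_cons, List.map_nil, List.sum_append, h1, hca,
        List.sum_cons, List.sum_nil]
      rw [ih]
      simp

theorem pv_A_closed (lands : List (List Int)) (flat B : Int) :
    dig_then_put_for_height_with_blocks lands flat B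
      = (if B + ((lands.flatMap id).map (fun b => b - flat)).sum < 0 then (500 * 500 * 256 * 2 : Int)
         else ((lands.flatMap id).map (fun b => if b ≥ flat then (b - flat) * 2 else flat - b)).sum) := by
  simp only [dig_then_put_for_height_with_blocks]
  have hstep : (fun (st : Int × Int) (block : Int) =>
      if block ≥ flat then
        let diff := block - flat
        (st.1 + diff, st.2 + diff * 2)
      else
        let diff := flat - block
        (st.1 - diff, st.2 + diff))
    = fun st block => (st.1 + (block - flat),
        st.2 + (if block ≥ flat then (block - flat) * 2 else flat - block)) := by
    funext st block
    by_cases h : block ≥ flat <;> simp [h] <;> ring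
  rw [hstep, pv_foldl_nested, pv_foldl_pair]
  simp

theorem pv_alt_closed (lands : List (List Int)) (flat B : Int) :
    dig_then_put_for_height_with_blocks_alt lands flat B
      = (if B + ((lands.flatMap id).map (fun b => b - flat)).sum < 0 then (500 * 500 * 256 * 2 : Int)
         else ((lands.flatMap id).map (fun b => if b ≥ flat then (b - flat) * 2 else flat - b)).sum) := by
  simp only [dig_then_put_for_height_with_blocks_alt]
  rw [pv_foldl_nested]
  rw [PySem.Dict.foldl_insert_getD_add_one_eq_counter]
  rw [PySem.Dict.items_counter]
  rw [List.foldl_map]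
  have hstep : (fun (st : Int × Int) (k : Int) =>
      if ((fun k => (k, ((lands.flatMap id).count k : Int))) k).1 ≥ flat then
        (st.1 + (((fun k => (k, ((lands.flatMap id).count k : Int))) k).1 - flat) * ((fun k => (k, ((lands.flatMap id).count k : Int))) k).2,
         st.2 + 2 * (((fun k => (k, ((lands.flatMap id).count k : Int))) k).1 - flat) * ((fun k => (k, ((lands.flatMap id).count k : Int))) k).2)
      else
        (st.1 - (flat - ((fun k => (k, ((lands.flatMap id).count k : Int))) k).1) * ((fun k => (k, ((lands.flatMap id).count k : Int))) k).2,
         st.2 + (flat - ((fun k => (k, ((lands.flatMap id).count k : Int))) k).1) * ((fun k => (k, ((lands.flatMap id).count k : Int))) k).2))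
    = fun st k => (st.1 + (k - flat) * ((lands.flatMap id).count k : Int),
        st.2 + (if k ≥ flat then (k - flat) * 2 else flat - k) * ((lands.flatMap id).count k : Int)) := by
    funext st k
    dsimp only
    by_cases h : k ≥ flat
    · simp only [if_pos h, Prod.mk.injEq]
      exact ⟨trivial, by ring⟩
    · simp only [if_neg h, Prod.mk.injEq]
      exact ⟨by ring, trivial⟩
  rw [hstep, pv_foldl_pair]
  rw [pv_sum_count (fun b => b - flat), pv_sum_count (fun b => if b ≥ flat then (b - flat) * 2 else flat - b)]
  simp

-- ===== VERDICT (by name: the statement is the Claim_ definition above) =====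
theorem dig_then_put_for_height_with_blocks_spec : Claim_equal_dig_then_put_for_height_with_blocks := by
  intro lands flat B _
  unfold Spec_dig_then_put_for_height_with_blocks
  rw [pv_A_closed, pv_alt_closed]
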